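-- pv_equiv track=rewrite | github.com/shutpa01/cryptic_solver_v2 | signature_solver/executor.py | try_container
-- ===== SOURCE A (Python) =====
-- def try_container(outer, inner, answer):
--     """Check if inner inserted into outer at any position produces the answer.
--
--     Returns: True if any valid insertion works.
--     """
--     answer_clean = answer.upper().replace(" ", "").replace("-", "")
--     outer_clean = outer.upper()
--     inner_clean = inner.upper()
--
--     # Try inserting inner at each position in outer
--     for i in range(1, len(outer_clean)):
--         candidate = outer_clean[:i] + inner_clean + outer_clean[i:]
--         if candidate == answer_clean:
--             return True
--     return False
-- ===== SOURCE B (Python) =====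
-- def _lcp(x, y):
--     """Length of the longest common prefix of two strings."""
--     k = 0
--     m = min(len(x), len(y))
--     while k < m and x[k] == y[k]:
--         k += 1
--     return k
--
--
-- def try_container(outer, inner, answer):
--     """Check if inner inserted into outer at any position produces the answer.
--
--     Returns: True if any valid insertion works.
--     """
--     a = answer.upper().replace(" ", "").replace("-", "")
--     o = outer.upper()
--     n = inner.upper()
--     if len(a) != len(o) + len(n):
--         return False
--     p = _lcp(o, a)                      # candidate position i must satisfy i <= p
--     s = _lcp(o[::-1], a[::-1])          # ... and len(o) - i <= s
--     lo = max(1, len(o) - s)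
--     hi = min(p, len(o) - 1)
--     ln = len(n)
--     return any(a[i:i + ln] == n for i in range(lo, hi + 1))
-- ===== Notes on version B (the rewrite author's own statement) =====
-- stated objective: faster
-- what changed: Instead of building and comparing a full candidate string for every insertion position, B checks the length once, computes the longest common prefix/suffix of outer and the cleaned answer to bound the feasible insertion positions, and only compares the inner-sized middle slice at those few positions.
import Mathlib
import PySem

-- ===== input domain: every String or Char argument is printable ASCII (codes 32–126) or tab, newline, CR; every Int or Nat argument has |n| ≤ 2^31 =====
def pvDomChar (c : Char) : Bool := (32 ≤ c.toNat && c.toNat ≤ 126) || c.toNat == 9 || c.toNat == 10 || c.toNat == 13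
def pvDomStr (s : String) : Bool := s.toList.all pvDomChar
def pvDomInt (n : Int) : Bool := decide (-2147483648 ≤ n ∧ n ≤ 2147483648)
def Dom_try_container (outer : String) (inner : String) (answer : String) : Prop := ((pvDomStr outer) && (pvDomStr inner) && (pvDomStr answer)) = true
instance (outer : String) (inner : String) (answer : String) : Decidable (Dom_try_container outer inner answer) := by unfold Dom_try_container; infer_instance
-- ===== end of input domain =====

-- B replaces A's per-position candidate construction by a length check plus common
-- prefix/suffix bounds on the feasible insertion positions (objective: faster).

-- answer.upper().replace(" ", "").replace("-", "") — identical cleaning line in both Pythons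
def pvClean (answer : String) : List Char :=
  PySem.Chars.replace (PySem.Chars.replace (PySem.Chars.upper answer.toList) [' '] []) ['-'] []

-- ===== PORT A =====
def try_container (outer : String) (inner : String) (answer : String) : Bool :=
  let a := pvClean answer
  let o := PySem.Chars.upper outer.toList
  let n := PySem.Chars.upper inner.toList
  -- for i in range(1, len(o)): if o[:i] + n + o[i:] == a: return True / return False
  (PySem.List.pyRange 1 (o.length : Int) 1).any fun i =>
    (PySem.List.slice o none (some i) ++ n ++ PySem.List.slice o (some i) none) == a

-- ===== PORT B =====
-- Source B's _lcp: left-to-right scan for the longest common prefix length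
def pvLcp : List Char → List Char → Nat
  | x :: xs, y :: ys => if x == y then pvLcp xs ys + 1 else 0
  | _, _ => 0

def try_container_alt (outer : String) (inner : String) (answer : String) : Bool :=
  let a := pvClean answer
  let o := PySem.Chars.upper outer.toList
  let n := PySem.Chars.upper inner.toList
  if a.length ≠ o.length + n.length then false
  else
    let p := pvLcp o a
    let s := pvLcp o.reverse a.reverse   -- _lcp(o[::-1], a[::-1]); s[::-1] is reverse
    let lo := max 1 (o.length - s)
    let hi := min p (o.length - 1)
    -- any(a[i:i+ln] == n for i in range(lo, hi+1)); a[i:i+ln] with 0 ≤ i is drop/take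
    (List.range' lo (hi + 1 - lo)).any fun i => ((a.drop i).take n.length) == n

-- ===== PRECONDITION & SPEC =====
def Spec_try_container (outer : String) (inner : String) (answer : String) (out : Bool) : Prop := out = try_container_alt outer inner answer
instance (outer : String) (inner : String) (answer : String) (out : Bool) : Decidable (Spec_try_container outer inner answer out) := by unfold Spec_try_container; infer_instance

-- ===== CLAIM (what is proved, stated in full; the proofs are below) =====
def Claim_equal_try_container : Prop := ∀ (outer : String) (inner : String) (answer : String), Dom_try_container outer inner answer → Spec_try_container outer inner answer (try_container outer inner answer)

-- ===== LEMMAS AND PROOFS =====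

lemma pvLcp_le_left : ∀ x y : List Char, pvLcp x y ≤ x.length := by
  intro x
  induction x with
  | nil => intro y; cases y <;> simp [pvLcp]
  | cons c xs ih =>
    intro y
    cases y with
    | nil => simp [pvLcp]
    | cons d ys =>
      by_cases h : c = d <;> simp [pvLcp, h]
      exact ih ys

lemma take_eq_take_iff_lcp : ∀ (x y : List Char) (k : Nat), k ≤ x.length → k ≤ y.length →
    (x.take k = y.take k ↔ k ≤ pvLcp x y) := by
  intro x
  induction x with
  | nil =>
    intro y k hx _
    have : k = 0 := by simp at hx; omega
    subst this
    simp
  | cons c xs ih =>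
    intro y k hx hy
    cases y with
    | nil =>
      have : k = 0 := by simpa using hy
      subst this
      simp
    | cons d ys =>
      cases k with
      | zero => simp
      | succ k =>
        by_cases h : c = d
        · subst h
          simp only [List.take_succ_cons, pvLcp, beq_self_eq_true, if_true, List.cons.injEq,
            true_and]
          rw [ih ys k (by simpa using hx) (by simpa using hy)]
          omega
        · simp [pvLcp, h]

lemma drop_eq_drop_iff_lcs (x y : List Char) (i j : Nat) (hi : i ≤ x.length) (hj : j ≤ y.length)
    (hlen : x.length - i = y.length - j) :
    (x.drop i = y.drop j ↔ x.length - i ≤ pvLcp x.reverse y.reverse) := by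
  constructor
  · intro h
    have hr : x.reverse.take (x.length - i) = y.reverse.take (y.length - j) := by
      rw [← List.reverse_drop, ← List.reverse_drop, h]
    rw [hlen] at hr ⊢
    exact (take_eq_take_iff_lcp x.reverse y.reverse (y.length - j) (by simp only [List.length_reverse]; omega)
      (by simp only [List.length_reverse]; omega)).mp hr
  · intro h
    have hr : x.reverse.take (x.length - i) = y.reverse.take (y.length - j) := by
      rw [hlen] at h ⊢
      exact (take_eq_take_iff_lcp x.reverse y.reverse (y.length - j) (by simp only [List.length_reverse]; omega)
        (by simp only [List.length_reverse]; omega)).mpr h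
    have := congrArg List.reverse hr
    rwa [← List.reverse_drop, ← List.reverse_drop, List.reverse_reverse, List.reverse_reverse]
      at this

-- the position-wise characterisation A's candidate test satisfies
lemma pv_core (O N A : List Char) (k : Nat) (_h1 : 1 ≤ k) (h2 : k < O.length) :
    (O.take k ++ N ++ O.drop k = A) ↔
    (A.length = O.length + N.length ∧ k ≤ pvLcp O A ∧
      O.length - k ≤ pvLcp O.reverse A.reverse ∧ (A.drop k).take N.length = N) := by
  have hkO : (O.take k).length = k := by simp; omega
  constructor
  · intro h
    subst h
    have hlen : (O.take k ++ N ++ O.drop k).length = O.length + N.length := by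
      simp; omega
    refine ⟨hlen, ?_, ?_, ?_⟩
    · -- prefix
      apply (take_eq_take_iff_lcp O _ k (by omega) (by rw [hlen]; omega)).mp
      have : (O.take k ++ (N ++ O.drop k)).take (O.take k).length = O.take k := List.take_left
      rw [hkO] at this
      rw [List.append_assoc, this]
    · -- suffix
      have hd : (O.take k ++ N ++ O.drop k).drop (k + N.length) = O.drop k := by
        have : ((O.take k ++ N) ++ O.drop k).drop (O.take k ++ N).length = O.drop k :=
          List.drop_left
        rwa [List.length_append, hkO] at this
      have := (drop_eq_drop_iff_lcs O (O.take k ++ N ++ O.drop k) k (k + N.length)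
        (by omega) (by rw [hlen]; omega) (by rw [hlen]; omega)).mp (hd.symm)
      exact this
    · -- middle
      have hd : (O.take k ++ (N ++ O.drop k)).drop (O.take k).length = N ++ O.drop k :=
        List.drop_left
      rw [hkO] at hd
      rw [List.append_assoc, hd]
      have : (N ++ O.drop k).take N.length = N := List.take_left
      exact this
  · rintro ⟨hlen, hp, hs, hm⟩
    have hpre : O.take k = A.take k :=
      (take_eq_take_iff_lcp O A k (by omega) (by omega)).mpr hp
    have hsuf : O.drop k = A.drop (k + N.length) :=
      (drop_eq_drop_iff_lcs O A k (k + N.length) (by omega) (by omega) (by omega)).mpr hs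
    have h3 : (A.drop k).drop N.length = O.drop k := by
      rw [List.drop_drop]; exact hsuf.symm
    rw [← hm, hpre, ← h3, List.append_assoc, List.take_append_drop, List.take_append_drop]

lemma pv_main (o n a : List Char) :
    ((PySem.List.pyRange 1 (o.length : Int) 1).any fun i =>
        (PySem.List.slice o none (some i) ++ n ++ PySem.List.slice o (some i) none) == a) =
      (if a.length ≠ o.length + n.length then false
       else (List.range' (max 1 (o.length - pvLcp o.reverse a.reverse))
          (min (pvLcp o a) (o.length - 1) + 1 - max 1 (o.length - pvLcp o.reverse a.reverse))).any
          fun i => ((a.drop i).take n.length) == n) := by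
  have hple : pvLcp o a ≤ o.length := pvLcp_le_left o a
  have hsle : pvLcp o.reverse a.reverse ≤ o.length := by
    have := pvLcp_le_left o.reverse a.reverse
    simpa using this
  rw [Bool.eq_iff_iff]
  by_cases hlen : a.length = o.length + n.length
  · simp only [hlen, ne_eq, not_true_eq_false, if_neg, List.any_eq_true, beq_iff_eq,
      PySem.List.mem_pyRange_one, List.mem_range'_1, not_false_eq_true]
    constructor
    · rintro ⟨i, ⟨hi1, hi2⟩, heq⟩
      have h0 : (0 : Int) ≤ i := by omega
      rw [PySem.List.slice_to o h0, PySem.List.slice_from o h0] at heq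
      set k := i.toNat with hk
      have hk1 : 1 ≤ k := by omega
      have hk2 : k < o.length := by omega
      obtain ⟨_, hp, hs, hm⟩ := (pv_core o n a k hk1 hk2).mp heq
      exact ⟨k, by omega, hm⟩
    · rintro ⟨k, hk, hm⟩
      have hk1 : 1 ≤ k := by omega
      have hk2 : k < o.length := by omega
      have heq := (pv_core o n a k hk1 hk2).mpr ⟨hlen, by omega, by omega, hm⟩
      refine ⟨(k : Int), ⟨by omega, by omega⟩, ?_⟩
      rw [PySem.List.slice_to o (by omega), PySem.List.slice_from o (by omega)]
      simpa using heq
  · simp only [hlen, ne_eq, not_false_eq_true, if_true, List.any_eq_true, beq_iff_eq,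
      PySem.List.mem_pyRange_one]
    constructor
    · rintro ⟨i, ⟨hi1, hi2⟩, heq⟩
      have h0 : (0 : Int) ≤ i := by omega
      rw [PySem.List.slice_to o h0, PySem.List.slice_from o h0] at heq
      have := ((pv_core o n a i.toNat (by omega) (by omega)).mp heq).1
      exact absurd this hlen
    · intro h
      exact absurd h (by simp)

-- ===== VERDICT (by name: the statement is the Claim_ definition above) =====
theorem try_container_spec : Claim_equal_try_container := by
  intro outer inner answer _
  unfold Spec_try_container try_container try_container_alt
  exact pv_main (PySem.Chars.upper outer.toList) (PySem.Chars.upper inner.toList)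
    (pvClean answer)
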